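-- pv_equiv track=rewrite | github.com/BruhLmao20/BlockGameAI | New Code/final/points-final.py | is_columns_full
-- ===== SOURCE A (Python) =====
-- def is_columns_full(array):
--     full_col_indices = []
--     num_cols = len(array[0])  # Number of columns in the array
--     for col_index in range(num_cols):
--         col = [row[col_index] for row in array]  # Get the column elements
--         if all(element == 1 for element in col) and len(col) == col.count(1):
--             full_col_indices.append(col_index + 1)  # Add the column index (+1 to make it 1-based)
--
--     return full_col_indices
-- ===== SOURCE B (Python) =====
-- def is_columns_full(array):
--     num_cols = len(array[0])
--     full = [True] * num_cols
--     for row in array: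
--         for c in range(num_cols):
--             if row[c] != 1:
--                 full[c] = False
--     return [c + 1 for c in range(num_cols) if full[c]]
-- ===== Notes on version B (the rewrite author's own statement) =====
-- stated objective: alternative
-- what changed: Replaces the column-major pass that materialises each column and tests it twice (all(...)==1 and len==count) with a single row-major pass maintaining a per-column boolean flag vector, then reads the surviving 1-based indices off the flags.
import Mathlib
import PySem

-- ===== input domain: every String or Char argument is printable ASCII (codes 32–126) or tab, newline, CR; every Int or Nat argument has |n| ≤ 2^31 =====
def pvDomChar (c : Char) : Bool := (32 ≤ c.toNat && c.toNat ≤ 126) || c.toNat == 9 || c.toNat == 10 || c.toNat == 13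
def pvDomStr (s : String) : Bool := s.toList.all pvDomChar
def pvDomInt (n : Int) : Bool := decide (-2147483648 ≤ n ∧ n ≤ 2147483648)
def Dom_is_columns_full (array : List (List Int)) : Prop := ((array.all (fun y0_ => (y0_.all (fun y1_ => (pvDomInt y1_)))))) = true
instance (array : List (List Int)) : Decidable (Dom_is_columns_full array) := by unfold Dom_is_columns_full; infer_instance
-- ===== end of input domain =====

-- B replaces A's column-major scan (build each column, test it twice) by one row-major
-- pass over the rows maintaining a per-column boolean flag vector; same cost, different decomposition.

-- ===== PORT A =====
def is_columns_full (array : List (List Int)) : List Int :=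
  let num_cols := ((PySem.List.pyGet? array 0).getD []).length
  (List.range num_cols).foldl (fun acc (col_index : Nat) =>
    let col := array.map (fun row => (PySem.List.pyGet? row (col_index : Int)).getD 0)
    if col.all (fun e => e == 1) && (col.length == PySem.List.count col 1)
    then acc ++ [(col_index : Int) + 1] else acc) []

-- ===== PORT B =====
def is_columns_full_alt (array : List (List Int)) : List Int :=
  let num_cols := ((PySem.List.pyGet? array 0).getD []).length
  let full := array.foldl (fun full row =>
    (List.range num_cols).foldl (fun full (c : Nat) =>
      if !((PySem.List.pyGet? row (c : Int)).getD 0 == 1) then full.set c false else full) full)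
    (List.replicate num_cols true)
  (List.range num_cols).foldl (fun acc (c : Nat) =>
    if full.getD c false then acc ++ [(c : Int) + 1] else acc) []

-- ===== PRECONDITION & SPEC =====
-- Pre_ excludes exactly the inputs where Python A raises IndexError: the empty array
-- (array[0]) and arrays with a row shorter than the first row (row[col_index]).
def Pre_is_columns_full (array : List (List Int)) : Prop :=
  array ≠ [] ∧ ∀ row ∈ array, (array.headD []).length ≤ row.length
instance (array : List (List Int)) : Decidable (Pre_is_columns_full array) := by
  unfold Pre_is_columns_full; infer_instance
def pvWitness_is_columns_full : List (List Int) := [[1, 2], [1, 1]]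
def Spec_is_columns_full (array : List (List Int)) (out : List Int) : Prop := out = is_columns_full_alt array
instance (array : List (List Int)) (out : List Int) : Decidable (Spec_is_columns_full array out) := by unfold Spec_is_columns_full; infer_instance

-- ===== CLAIM (what is proved, stated in full; the proofs are below) =====
def Claim_equal_is_columns_full : Prop := ∀ (array : List (List Int)), Dom_is_columns_full array → Pre_is_columns_full array → Spec_is_columns_full array (is_columns_full array)

-- ===== LEMMAS AND PROOFS =====

-- the common column predicate: every row holds 1 at position c
def pvColFull (array : List (List Int)) (c : Nat) : Bool :=
  array.all (fun row => (PySem.List.pyGet? row (c : Int)).getD 0 == 1)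

-- inner loop of B: flags after scanning the column indices l for one row
theorem pv_inner_getD (row : List Int) (l : List Nat) (full : List Bool) (c : Nat) :
    (l.foldl (fun full (c : Nat) =>
      if !((PySem.List.pyGet? row (c : Int)).getD 0 == 1) then full.set c false else full) full).getD c false
    = (full.getD c false && (decide (c ∉ l) || ((PySem.List.pyGet? row (c : Int)).getD 0 == 1))) := by
  induction l generalizing full with
  | nil => simp
  | cons a l ih =>
    simp only [List.foldl_cons, ih]
    by_cases hca : c = a
    · subst hca
      by_cases hp : row[c]?.getD 0 = (1 : Int)
      · simp [hp]
      · have hset : (full.set c false)[c]?.getD false = false := by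
          by_cases hlen : c < full.length
          · simp [hlen]
          · rw [List.set_eq_of_length_le (Nat.le_of_not_lt hlen)]
            simp [List.getElem?_eq_none (Nat.le_of_not_lt hlen)]
        simp [hp, hset]
    · by_cases hp : row[(a : Nat)]?.getD 0 = (1 : Int)
      · simp [hp, hca]
      · simp [hp, hca, List.getD, List.getElem?_set_ne (fun h => hca h.symm)]

-- outer loop of B: the flag at c < n records whether every processed row holds 1 at c
theorem pv_outer_getD (n : Nat) (rows : List (List Int)) (full : List Bool) (c : Nat) (hc : c < n) :
    (rows.foldl (fun full row =>
      (List.range n).foldl (fun full (c : Nat) =>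
        if !((PySem.List.pyGet? row (c : Int)).getD 0 == 1) then full.set c false else full) full) full).getD c false
    = (full.getD c false && pvColFull rows c) := by
  induction rows generalizing full with
  | nil => simp [pvColFull]
  | cons r rows ih =>
    simp only [List.foldl_cons]
    rw [ih, pv_inner_getD]
    simp [pvColFull, List.mem_range, hc, Bool.and_assoc]

-- A's per-column test equals the common predicate (the len==count clause is redundant)
theorem pv_condA (array : List (List Int)) (c : Nat) :
    ((array.map (fun row => (PySem.List.pyGet? row (c : Int)).getD 0)).all (fun e => e == 1)
      && ((array.map (fun row => (PySem.List.pyGet? row (c : Int)).getD 0)).length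
          == PySem.List.count (array.map (fun row => (PySem.List.pyGet? row (c : Int)).getD 0)) 1))
    = pvColFull array c := by
  set col := array.map (fun row => (PySem.List.pyGet? row (c : Int)).getD 0) with hcol
  have hall : col.all (fun e => e == 1) = pvColFull array c := by
    simp [hcol, pvColFull, List.all_map, Function.comp_def]
  cases hA : col.all (fun e => e == 1) with
  | true =>
    have hcnt : List.count 1 col = col.length := by
      rw [List.count_eq_length]
      intro b hb
      exact (eq_of_beq (List.all_eq_true.mp hA b hb)).symm
    rw [Bool.true_and, PySem.List.count_eq, hcnt, beq_self_eq_true]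
    exact hA ▸ hall
  | false =>
    simp only [Bool.false_and]
    exact hA ▸ hall

-- ===== VERDICT (by name: the statement is the Claim_ definition above) =====
theorem is_columns_full_spec : Claim_equal_is_columns_full := by
  intro array _ _
  unfold Spec_is_columns_full is_columns_full is_columns_full_alt
  set n := ((PySem.List.pyGet? array 0).getD []).length with hn
  rw [PySem.List.foldl_append_if, PySem.List.foldl_append_if]
  simp only [List.nil_append]
  refine congrArg (List.map fun c : Nat => (c : Int) + 1) (List.filter_congr ?_)
  intro c hc
  have hcn : c < n := List.mem_range.mp hc
  rw [pv_condA, pv_outer_getD n array (List.replicate n true) c hcn]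
  simp [List.getD, hcn, pvColFull]
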